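-- pv_equiv track=rewrite | github.com/ayanasamuel8/A2SV_HUB | 09-Apr-2025/ Network Topology 329805.py | isBus
-- ===== SOURCE A (Python) =====
-- def isBus(indegree):
--     one = 0
--     for i in indegree:
--         if i == 1 and one < 2:
--             one += 1
--         elif i == 2:
--             continue
--         else:
--             return False
--     return True
-- ===== SOURCE B (Python) =====
-- def isBus(indegree):
--     xs = list(indegree)
--     for i in xs:
--         if i != 1 and i != 2:
--             return False
--     return xs.count(1) <= 2
-- ===== Notes on version B (the rewrite author's own statement) =====
-- stated objective: simpler
-- what changed: Replaced the single interleaved pass with a capped counter by a plain validity scan (every element is 1 or 2) followed by a count: valid and count(1) <= 2.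
import Mathlib
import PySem

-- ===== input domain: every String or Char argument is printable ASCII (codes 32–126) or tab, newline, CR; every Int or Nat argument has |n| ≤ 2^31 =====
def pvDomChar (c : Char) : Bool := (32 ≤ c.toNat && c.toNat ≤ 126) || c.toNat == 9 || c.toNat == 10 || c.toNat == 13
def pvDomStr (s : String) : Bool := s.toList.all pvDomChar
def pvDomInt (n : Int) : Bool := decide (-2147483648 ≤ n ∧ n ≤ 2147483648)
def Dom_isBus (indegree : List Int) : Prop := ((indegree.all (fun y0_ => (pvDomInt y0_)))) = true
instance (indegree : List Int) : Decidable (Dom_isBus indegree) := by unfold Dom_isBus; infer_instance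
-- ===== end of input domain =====

-- B replaces A's single pass with a capped counter by a validity scan plus a count; objective: simpler.

-- ===== PORT A =====
-- loop of A: state 'one', early return False on an invalid element or a third 1
def isBusGo (one : Int) : List Int → Bool
  | [] => true
  | i :: rest =>
      if i == 1 && one < 2 then isBusGo (one + 1) rest
      else if i == 2 then isBusGo one rest
      else false

def isBus (indegree : List Int) : Bool := isBusGo 0 indegree

-- ===== PORT B =====
-- validity pass (early-return loop ≙ List.all), then count of 1s
def isBus_alt (indegree : List Int) : Bool :=
  if indegree.all (fun i => i == 1 || i == 2) then decide ((indegree.count 1 : Int) ≤ 2)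
  else false

-- ===== PRECONDITION & SPEC =====
def Spec_isBus (indegree : List Int) (out : Bool) : Prop := out = isBus_alt indegree
instance (indegree : List Int) (out : Bool) : Decidable (Spec_isBus indegree out) := by unfold Spec_isBus; infer_instance

-- ===== CLAIM (what is proved, stated in full; the proofs are below) =====
def Claim_equal_isBus : Prop := ∀ (indegree : List Int), Dom_isBus indegree → Spec_isBus indegree (isBus indegree)

-- ===== LEMMAS AND PROOFS =====
theorem isBusGo_eq (xs : List Int) : ∀ (one : Int), 0 ≤ one → one ≤ 2 →
    isBusGo one xs =
      (xs.all (fun i => i == 1 || i == 2) && decide ((xs.count 1 : Int) + one ≤ 2)) := by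
  induction xs with
  | nil =>
    intro one h1 h2
    simp only [isBusGo, List.all_nil, List.count_nil, Bool.true_and]
    simp
    omega
  | cons i rest ih =>
    intro one h1 h2
    by_cases hi1 : i = 1
    · subst hi1
      by_cases hlt : one < 2
      · rw [show isBusGo one (1 :: rest) = isBusGo (one + 1) rest from by
            simp [isBusGo, hlt]]
        rw [ih (one + 1) (by omega) (by omega)]
        simp only [List.all_cons, List.count_cons, beq_self_eq_true, Bool.true_or,
          Bool.true_and, if_pos]
        congr 1
        simp
        omega
      · rw [show isBusGo one (1 :: rest) = false from by
            simp [isBusGo]; omega]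
        have hone : one = 2 := by omega
        subst hone
        have hc : (1 : Int) ≤ ((1 :: rest).count 1 : Int) := by
          exact_mod_cast List.count_pos_iff.mpr (by simp : (1:Int) ∈ (1 :: rest))
        rw [show (decide (((1 :: rest).count 1 : Int) + 2 ≤ 2)) = false from by
            simp only [decide_eq_false_iff_not]; omega]
        simp
    · by_cases hi2 : i = 2
      · subst hi2
        rw [show isBusGo one ((2:Int) :: rest) = isBusGo one rest from by
            simp [isBusGo]]
        rw [ih one h1 h2]
        simp only [List.all_cons, List.count_cons]
        norm_num
      · rw [show isBusGo one (i :: rest) = false from by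
            simp [isBusGo, hi1, hi2]]
        simp [hi1, hi2]

theorem isBus_spec' : ∀ (indegree : List Int), isBus indegree = isBus_alt indegree := by
  intro xs
  rw [isBus, isBusGo_eq xs 0 le_rfl (by norm_num), isBus_alt]
  by_cases h : xs.all (fun i => i == 1 || i == 2) <;> simp [h]

-- ===== VERDICT (by name: the statement is the Claim_ definition above) =====
theorem isBus_spec : Claim_equal_isBus := by
  intro xs _
  exact isBus_spec' xs
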